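-- pv_equiv track=rewrite | github.com/HereComesTheMoon/TauTilting | analysis/analysis.py | iterate_diags
-- ===== SOURCE A (Python) =====
-- import typing
--
-- def iterate_diags(table: list[list[int]]) -> typing.Generator[list[int], None, None]:
--     for row in table:
--         assert len(row) == len(table[0])
--     for k in range(len(table[0]) - 1, 0, -1):
--         diag = [table[i][k + i] for i in range(min(len(table), len(table[0]) - k))]
--         if any(diag):
--             yield diag
--     for k in range(len(table)):
--         diag = [table[k + i][i] for i in range(min(len(table[0]), len(table) - k))]
--         if any(diag):
--             yield diag
-- ===== SOURCE B (Python) =====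
-- def iterate_diags(table):
--     for row in table:
--         assert len(row) == len(table[0])
--     cells = [(j - i, v) for i, row in enumerate(table) for j, v in enumerate(row)]
--     buckets = {}
--     for d, v in cells:
--         buckets[d] = buckets.get(d, []) + [v]
--     for d in range(len(table[0]) - 1, -len(table), -1):
--         diag = buckets.get(d, [])
--         if any(diag):
--             yield diag
-- ===== Notes on version B (the rewrite author's own statement) =====
-- stated objective: alternative
-- what changed: B builds an index of all diagonals in one sweep over the cells (a dict keyed by offset j-i) and then walks the offsets from len(table[0])-1 down to -(len(table)-1), instead of re-scanning the table with a fresh index comprehension for each of the two diagonal families.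
import Mathlib
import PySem

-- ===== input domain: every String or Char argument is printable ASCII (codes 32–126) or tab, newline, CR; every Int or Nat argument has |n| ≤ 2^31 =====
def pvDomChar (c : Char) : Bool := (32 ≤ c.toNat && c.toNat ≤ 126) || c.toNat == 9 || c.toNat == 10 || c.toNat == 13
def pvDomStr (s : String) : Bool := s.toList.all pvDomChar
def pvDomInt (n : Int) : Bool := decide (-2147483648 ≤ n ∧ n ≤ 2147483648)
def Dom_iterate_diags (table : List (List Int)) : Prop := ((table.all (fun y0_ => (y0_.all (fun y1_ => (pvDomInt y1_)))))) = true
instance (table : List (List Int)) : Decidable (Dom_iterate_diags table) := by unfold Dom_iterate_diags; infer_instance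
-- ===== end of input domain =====

-- B groups all cells into a dict keyed by the diagonal offset j-i in one sweep, then walks the
-- offsets top-down, instead of A's two per-diagonal index comprehensions; alternative decomposition,
-- same asymptotic cost; return-value equivalence (the Python originals are generators, compared as lists).

-- ===== PORT A =====
def iterate_diags (table : List (List Int)) : List (List Int) :=
  let upper := (PySem.List.pyRange (PySem.List.len (PySem.List.pyGetD table 0 []) - 1) 0 (-1)).foldl
    (fun out k =>
      let diag := (PySem.List.pyRange 0 (min (PySem.List.len table) (PySem.List.len (PySem.List.pyGetD table 0 []) - k)) 1).map
        (fun i => PySem.List.pyGetD (PySem.List.pyGetD table i []) (k + i) 0)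
      if diag.any (fun x => x != 0) then out ++ [diag] else out) []
  (PySem.List.pyRange 0 (PySem.List.len table) 1).foldl
    (fun out k =>
      let diag := (PySem.List.pyRange 0 (min (PySem.List.len (PySem.List.pyGetD table 0 [])) (PySem.List.len table - k)) 1).map
        (fun i => PySem.List.pyGetD (PySem.List.pyGetD table (k + i) []) i 0)
      if diag.any (fun x => x != 0) then out ++ [diag] else out) upper

-- ===== PORT B =====
def iterate_diags_alt (table : List (List Int)) : List (List Int) :=
  let cells := (PySem.List.enumerate table 0).flatMap
    (fun ir => (PySem.List.enumerate ir.2 0).map (fun jv => (jv.1 - ir.1, jv.2)))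
  let buckets := cells.foldl
    (fun (b : PySem.Dict Int (List Int)) p => b.modify p.1 [] (· ++ [p.2])) PySem.Dict.empty
  (PySem.List.pyRange (PySem.List.len (PySem.List.pyGetD table 0 []) - 1) (-(PySem.List.len table)) (-1)).foldl
    (fun out d =>
      let diag := buckets.getD d []
      if diag.any (fun x => x != 0) then out ++ [diag] else out) []

-- ===== PRECONDITION & SPEC =====
-- Pre_ excludes the empty table (A's table[0] raises IndexError) and ragged tables (A's assert raises AssertionError).
def Pre_iterate_diags (table : List (List Int)) : Prop :=
  table ≠ [] ∧ ∀ row ∈ table, row.length = (table.headD []).length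
instance (table : List (List Int)) : Decidable (Pre_iterate_diags table) := by
  unfold Pre_iterate_diags; infer_instance
def pvWitness_iterate_diags : List (List Int) := [[1, 2], [3, 4]]
def Spec_iterate_diags (table : List (List Int)) (out : List (List Int)) : Prop := out = iterate_diags_alt table
instance (table : List (List Int)) (out : List (List Int)) : Decidable (Spec_iterate_diags table out) := by unfold Spec_iterate_diags; infer_instance

-- ===== CLAIM (what is proved, stated in full; the proofs are below) =====
def Claim_equal_iterate_diags : Prop := ∀ (table : List (List Int)), Dom_iterate_diags table → Pre_iterate_diags table → Spec_iterate_diags table (iterate_diags table)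

-- ===== LEMMAS AND PROOFS =====

theorem pv_filt_enum (row : List Int) (s t : Int) :
    ((PySem.List.enumerate row s).filter (fun jv => jv.1 == t)).map (fun p => p.2)
    = if 0 ≤ t - s ∧ t - s < (row.length : Int) then [PySem.List.pyGetD row (t - s) 0] else [] := by
  induction row generalizing s with
  | nil => simp [PySem.List.enumerate_nil]
  | cons x xs ih =>
    rw [PySem.List.enumerate_cons, List.filter_cons]
    by_cases h : s = t
    · subst h
      rw [if_pos (by simp), List.map_cons, ih (s + 1), if_neg (by omega),
        if_pos (show (0:Int) ≤ s - s ∧ s - s < ((x :: xs).length : Int) by simp),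
        show s - s = (0:Int) by ring, PySem.List.pyGetD_zero_cons]
    · rw [if_neg (by simp [h]), ih (s + 1)]
      by_cases h2 : 0 ≤ t - s ∧ t - s < ((x :: xs).length : Int)
      · rw [if_pos (by simp at h2 ⊢; omega), if_pos h2]
        congr 1
        rw [PySem.List.pyGetD_eq_getElem xs 0 (by omega) (by simp at h2; omega),
          PySem.List.pyGetD_eq_getElem (x :: xs) 0 (by omega) h2.2]
        simp only [show (t - s).toNat = (t - (s + 1)).toNat + 1 from by omega,
          List.getElem_cons_succ]
      · rw [if_neg (by simp at h2 ⊢; omega), if_neg h2]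
theorem pv_bucket_eq (table : List (List Int)) (d : Int) :
    (((PySem.List.enumerate table 0).flatMap
        (fun ir => (PySem.List.enumerate ir.2 0).map (fun jv => (jv.1 - ir.1, jv.2)))).foldl
      (fun (b : PySem.Dict Int (List Int)) p => b.modify p.1 [] (· ++ [p.2])) PySem.Dict.empty).getD d []
    = (PySem.List.enumerate table 0).flatMap
        (fun ir => if 0 ≤ d + ir.1 ∧ d + ir.1 < (ir.2.length : Int)
                   then [PySem.List.pyGetD ir.2 (d + ir.1) 0] else []) := by
  rw [PySem.Dict.getD_foldl_modify_append, PySem.Dict.getD_empty, List.nil_append,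
    List.filter_flatMap, List.map_flatMap]
  refine List.flatMap_congr (fun ir _ => ?_)
  rw [List.filter_map, List.map_map, List.filter_congr
    (q := fun jv => jv.1 == d + ir.1)
    (fun jv _ => by show (jv.1 - ir.1 == d) = (jv.1 == d + ir.1); rw [Bool.eq_iff_iff]; simp only [beq_iff_eq]; omega)]
  have := pv_filt_enum ir.2 0 (d + ir.1)
  rw [show ((fun x => x.2) ∘ fun jv => (jv.1 - ir.1, jv.2) : Int × Int → Int) = (fun p => p.2) from rfl]
  rw [this, sub_zero]
theorem pv_window {α : Type} (N : Nat) (lo c : Int) (g : Int → α) (hlo : 0 ≤ lo) :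
    (PySem.List.pyRange 0 (N : Int) 1).flatMap (fun i => if lo ≤ i ∧ i < lo + c then [g i] else [])
    = (PySem.List.pyRange 0 (min ((N : Int) - lo) c) 1).map (fun i => g (lo + i)) := by
  induction N with
  | zero =>
    rw [PySem.List.pyRange_one_eq_nil (by omega), PySem.List.pyRange_one_eq_nil (by omega)]
    rfl
  | succ N ih =>
    rw [show ((N + 1 : Nat) : Int) = (N : Int) + 1 by push_cast; ring,
      PySem.List.pyRange_one_succ_right (by omega), List.flatMap_append, ih,
      List.flatMap_cons, List.flatMap_nil, List.append_nil]
    by_cases h : lo ≤ (N : Int) ∧ (N : Int) < lo + c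
    · rw [if_pos h, show min ((N : Int) + 1 - lo) c = min ((N : Int) - lo) c + 1 by omega,
        PySem.List.pyRange_one_succ_right (by omega), List.map_append]
      simp only [List.map_cons, List.map_nil]
      rw [show lo + min ((N : Int) - lo) c = (N : Int) by omega]
    · rw [if_neg h, List.append_nil]
      rcases le_or_gt lo (N : Int) with h1 | h1
      · rw [show min ((N : Int) + 1 - lo) c = min ((N : Int) - lo) c by omega]
      · rw [PySem.List.pyRange_one_eq_nil (by omega), PySem.List.pyRange_one_eq_nil (by omega)]
theorem pv_filtmap_congr {α β : Type} (l : List α) (g g' : α → β) (q : β → Bool)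
    (h : ∀ x ∈ l, g x = g' x) :
    (l.filter (fun x => q (g x))).map g = (l.filter (fun x => q (g' x))).map g' := by
  rw [List.filter_congr (q := fun x => q (g' x)) (fun x hx => by rw [h x hx])]
  exact List.map_congr_left (fun x hx => h x (List.mem_filter.mp hx).1)
theorem pv_range_split (m n : Int) (hm : 1 ≤ m) (hn : 1 ≤ n) :
    PySem.List.pyRange (m - 1) (-n) (-1)
    = PySem.List.pyRange (m - 1) 0 (-1) ++ PySem.List.pyRange 0 (-n) (-1) := by
  rw [PySem.List.pyRange_neg_one_eq_reverse, PySem.List.pyRange_neg_one_eq_reverse,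
    PySem.List.pyRange_neg_one_eq_reverse]
  rw [show m - 1 + 1 = m by ring, show (0:Int) + 1 = 1 by ring,
    PySem.List.pyRange_one_append (-n + 1) 1 m (by omega) (by omega), List.reverse_append]
theorem pv_range_neg (n : Int) :
    PySem.List.pyRange 0 (-n) (-1) = (PySem.List.pyRange 0 n 1).map Neg.neg := by
  rw [PySem.List.pyRange_neg_one, PySem.List.pyRange_one, List.map_map,
    show (0 : Int) - -n = n - 0 by ring]
  exact List.map_congr_left (fun k _ => by simp)
theorem pv_bucket_flat (table : List (List Int)) (m : Nat)
    (hrect : ∀ row ∈ table, row.length = m) (d : Int) :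
    (((PySem.List.enumerate table 0).flatMap
        (fun ir => (PySem.List.enumerate ir.2 0).map (fun jv => (jv.1 - ir.1, jv.2)))).foldl
      (fun (b : PySem.Dict Int (List Int)) p => b.modify p.1 [] (· ++ [p.2])) PySem.Dict.empty).getD d []
    = (PySem.List.pyRange 0 (table.length : Int) 1).flatMap
        (fun i => if 0 ≤ d + i ∧ d + i < (m : Int)
                  then [PySem.List.pyGetD (PySem.List.pyGetD table i []) (d + i) 0] else []) := by
  rw [pv_bucket_eq, PySem.List.enumerate_eq_map_pyRange table ([] : List Int), List.flatMap_map,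
    PySem.List.len_eq]
  refine List.flatMap_congr (fun i hi => ?_)
  have hi' := (PySem.List.mem_pyRange_one).mp hi
  have hlen : ((PySem.List.pyGetD table i []).length : Int) = (m : Int) := by
    rw [PySem.List.pyGetD_eq_getElem table [] hi'.1 (by exact_mod_cast hi'.2)]
    exact_mod_cast congrArg Nat.cast (hrect _ (List.getElem_mem _))
  show (if 0 ≤ d + i ∧ d + i < ((PySem.List.pyGetD table i []).length : Int) then _ else _) = _
  rw [hlen]

theorem pv_upper (table : List (List Int)) (m : Nat)
    (hrect : ∀ row ∈ table, row.length = m) (k : Int) (hk0 : 0 < k) :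
    (((PySem.List.enumerate table 0).flatMap
        (fun ir => (PySem.List.enumerate ir.2 0).map (fun jv => (jv.1 - ir.1, jv.2)))).foldl
      (fun (b : PySem.Dict Int (List Int)) p => b.modify p.1 [] (· ++ [p.2])) PySem.Dict.empty).getD k []
    = (PySem.List.pyRange 0 (min (table.length : Int) ((m : Int) - k)) 1).map
        (fun i => PySem.List.pyGetD (PySem.List.pyGetD table i []) (k + i) 0) := by
  rw [pv_bucket_flat table m hrect k,
    List.flatMap_congr (g := fun i => if 0 ≤ i ∧ i < 0 + ((m : Int) - k)
      then [PySem.List.pyGetD (PySem.List.pyGetD table i []) (k + i) 0] else [])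
      (fun i hi => if_congr (by have := (PySem.List.mem_pyRange_one).mp hi; omega) rfl rfl),
    pv_window table.length 0 ((m : Int) - k) _ le_rfl]
  simp only [zero_add, sub_zero]

theorem pv_lower (table : List (List Int)) (m : Nat)
    (hrect : ∀ row ∈ table, row.length = m) (k : Int) (hk0 : 0 ≤ k) :
    (((PySem.List.enumerate table 0).flatMap
        (fun ir => (PySem.List.enumerate ir.2 0).map (fun jv => (jv.1 - ir.1, jv.2)))).foldl
      (fun (b : PySem.Dict Int (List Int)) p => b.modify p.1 [] (· ++ [p.2])) PySem.Dict.empty).getD (-k) []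
    = (PySem.List.pyRange 0 (min ((m : Int)) ((table.length : Int) - k)) 1).map
        (fun i => PySem.List.pyGetD (PySem.List.pyGetD table (k + i) []) i 0) := by
  rw [pv_bucket_flat table m hrect (-k),
    List.flatMap_congr (g := fun i => if k ≤ i ∧ i < k + (m : Int)
      then [PySem.List.pyGetD (PySem.List.pyGetD table i []) (-k + i) 0] else [])
      (fun i hi => if_congr (by have := (PySem.List.mem_pyRange_one).mp hi; omega) rfl rfl),
    pv_window table.length k (m : Int) _ hk0, min_comm]
  simp only [neg_add_cancel_left]

theorem iterate_diags_spec : Claim_equal_iterate_diags := by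
  intro table hdom hpre
  obtain ⟨hne, hrect⟩ := hpre
  obtain ⟨r, rest, rfl⟩ : ∃ r rest, table = r :: rest := by
    cases table with
    | nil => exact absurd rfl hne
    | cons r rest => exact ⟨r, rest, rfl⟩
  simp only [Spec_iterate_diags, iterate_diags, iterate_diags_alt,
    PySem.List.pyGetD_zero_cons, PySem.List.len_eq]
  rw [PySem.List.foldl_append_if, PySem.List.foldl_append_if, PySem.List.foldl_append_if]
  have hrect' : ∀ row ∈ r :: rest, row.length = r.length := by simpa using hrect
  by_cases hM0 : r.length = 0
  · simp only [hM0, Nat.cast_zero, zero_sub]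
    rw [PySem.List.pyRange_neg_one_eq_nil (by norm_num : (-1:Int) ≤ 0)]
    simp only [List.filter_nil, List.map_nil, List.nil_append]
    rw [List.filter_eq_nil_iff.mpr (fun k _ => by
        rw [PySem.List.pyRange_one_eq_nil (min_le_left _ _)]; simp),
      List.filter_eq_nil_iff.mpr (fun d _ => by
        rw [pv_bucket_flat (r :: rest) 0 (fun row h => by rw [hrect' row h, hM0]) d,
          List.flatMap_congr (g := fun _ => ([] : List Int))
            (fun i _ => by rw [if_neg (by push_cast; omega)])]
        simp)]
    simp
  · rw [pv_range_split ((r.length : Int)) (((r :: rest).length : Int)) (by omega)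
      (by push_cast [List.length_cons]; omega)]
    rw [List.filter_append, List.map_append]
    simp only [List.nil_append]
    congr 1
    · refine pv_filtmap_congr (PySem.List.pyRange ((r.length : Int) - 1) 0 (-1))
        (fun k => (PySem.List.pyRange 0 (min (((r :: rest).length : Int)) ((r.length : Int) - k)) 1).map
          (fun i => PySem.List.pyGetD (PySem.List.pyGetD (r :: rest) i []) (k + i) 0))
        (fun d => (((PySem.List.enumerate (r :: rest) 0).flatMap
          (fun ir => (PySem.List.enumerate ir.2 0).map (fun jv => (jv.1 - ir.1, jv.2)))).foldl
        (fun (b : PySem.Dict Int (List Int)) p => b.modify p.1 [] (· ++ [p.2])) PySem.Dict.empty).getD d [])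
        (fun l => l.any (fun x => x != 0)) (fun k hk => ?_)
      have hk' := PySem.List.mem_pyRange_neg_one.mp hk
      exact (pv_upper (r :: rest) r.length hrect' k hk'.1).symm
    · rw [pv_range_neg, List.filter_map, List.map_map]
      refine pv_filtmap_congr (PySem.List.pyRange 0 (((r :: rest).length : Int)) 1)
        (fun k => (PySem.List.pyRange 0 (min ((r.length : Int)) (((r :: rest).length : Int) - k)) 1).map
          (fun i => PySem.List.pyGetD (PySem.List.pyGetD (r :: rest) (k + i) []) i 0))
        ((fun d => (((PySem.List.enumerate (r :: rest) 0).flatMap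
          (fun ir => (PySem.List.enumerate ir.2 0).map (fun jv => (jv.1 - ir.1, jv.2)))).foldl
        (fun (b : PySem.Dict Int (List Int)) p => b.modify p.1 [] (· ++ [p.2])) PySem.Dict.empty).getD d []) ∘ Neg.neg)
        (fun l => l.any (fun x => x != 0)) (fun k hk => ?_)
      have hk' := PySem.List.mem_pyRange_one.mp hk
      exact (pv_lower (r :: rest) r.length hrect' k hk'.1).symm
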